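-- pv_equiv track=rewrite | github.com/GutesBrot/AdventOfCode2024 | 09/D9_2.py | get_file_positions
-- ===== SOURCE A (Python) =====
-- def get_file_positions(disk):
--     """
--     Return a dict mapping file_id (as string) to (start_position, length).
--     """
--     file_map = {}
--     start = None
--     current_id = None
--     for i, block in enumerate(disk):
--         if block == '.':
--             if current_id is not None:
--                 file_map[current_id] = (start, i - start)
--                 current_id = None
--         else:
--             if block != current_id:
--                 if current_id is not None:
--                     file_map[current_id] = (start, i - start)
--                 current_id = block
--                 start = i
--     if current_id is not None:
--         file_map[current_id] = (start, len(disk) - start)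
--     return file_map
-- ===== SOURCE B (Python) =====
-- def get_file_positions(disk):
--     """
--     Return a dict mapping file_id (as string) to (start_position, length).
--     Run-based: jump over each maximal run of equal blocks at once.
--     """
--     file_map = {}
--     n = len(disk)
--     i = 0
--     while i < n:
--         block = disk[i]
--         j = i + 1
--         while j < n and disk[j] == block:
--             j += 1
--         if block != '.':
--             file_map[block] = (i, j - i)
--         i = j
--     return file_map
-- ===== Notes on version B (the rewrite author's own statement) =====
-- stated objective: alternative
-- what changed: Replaced the per-block current_id/start state machine (with boundary inserts and a post-loop flush) by a run-based scan: an outer loop jumps from run to run, an inner scan finds each maximal run's end, and each non-'.' run is recorded directly; no carried state or flush remains.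
import Mathlib
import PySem

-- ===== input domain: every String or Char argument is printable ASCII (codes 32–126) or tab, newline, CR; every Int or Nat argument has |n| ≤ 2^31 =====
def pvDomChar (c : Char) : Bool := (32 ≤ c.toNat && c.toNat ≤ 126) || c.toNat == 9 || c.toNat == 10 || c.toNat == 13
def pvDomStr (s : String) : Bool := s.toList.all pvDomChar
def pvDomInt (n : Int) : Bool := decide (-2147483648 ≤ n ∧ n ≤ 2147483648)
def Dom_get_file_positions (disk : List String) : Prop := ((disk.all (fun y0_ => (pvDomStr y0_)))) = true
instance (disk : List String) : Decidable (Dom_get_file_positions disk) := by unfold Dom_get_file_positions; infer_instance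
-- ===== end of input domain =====

-- B replaces A's per-block current_id/start state machine (with post-loop flush) by a
-- run-based scan that jumps from maximal run to maximal run; alternative decomposition, same cost.

-- ===== PORT A =====
-- loop body of A's for-loop; state = (file_map, current_id, start).
-- Python's start/current_id begin as None; start is only ever read after it has been
-- assigned, so start is modelled as an Int initialised to 0.
def getfpStep (st : PySem.Dict String (Int × Int) × Option String × Int)
    (p : Int × String) : PySem.Dict String (Int × Int) × Option String × Int :=
  let m := st.1; let cur := st.2.1; let start := st.2.2
  let i := p.1; let block := p.2
  if block == "." then
    match cur with
    | some c => (m.insert c (start, i - start), none, start)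
    | none => (m, cur, start)
  else if some block ≠ cur then   -- Python 'block != current_id' (a str never equals None)
    match cur with
    | some c => (m.insert c (start, i - start), some block, i)
    | none => (m, some block, i)
  else (m, cur, start)

-- the post-loop 'if current_id is not None' flush
def getfpFinish (st : PySem.Dict String (Int × Int) × Option String × Int) (n : Int) :
    PySem.Dict String (Int × Int) :=
  match st.2.1 with
  | some c => st.1.insert c (st.2.2, n - st.2.2)
  | none => st.1

def get_file_positions (disk : List String) : List (String × Int × Int) :=
  (getfpFinish ((PySem.List.enumerate disk).foldl getfpStep (PySem.Dict.empty, none, 0))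
    (disk.length : Int)).items

-- ===== PORT B =====
-- B's inner while loop: how many leading blocks of t equal `block` (j - i - 1)
def runLen (block : String) : List String → Nat
  | [] => 0
  | b :: t => if b == block then 1 + runLen block t else 0

-- B's outer while loop: record one maximal run, then jump past it
def altLoop (m : PySem.Dict String (Int × Int)) (i : Int) :
    List String → PySem.Dict String (Int × Int)
  | [] => m
  | block :: t =>
      let c := runLen block t
      altLoop (if block ≠ "." then m.insert block (i, 1 + (c : Int)) else m)
        (i + 1 + (c : Int)) (t.drop c)
termination_by l => l.length
decreasing_by simp

def get_file_positions_alt (disk : List String) : List (String × Int × Int) :=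
  (altLoop PySem.Dict.empty 0 disk).items

-- ===== PRECONDITION & SPEC =====
def Spec_get_file_positions (disk : List String) (out : List (String × Int × Int)) : Prop := out = get_file_positions_alt disk
instance (disk : List String) (out : List (String × Int × Int)) : Decidable (Spec_get_file_positions disk out) := by unfold Spec_get_file_positions; infer_instance

-- ===== CLAIM (what is proved, stated in full; the proofs are below) =====
def Claim_equal_get_file_positions : Prop := ∀ (disk : List String), Dom_get_file_positions disk → Spec_get_file_positions disk (get_file_positions disk)

-- ===== LEMMAS AND PROOFS =====

lemma altLoop_nil (m : PySem.Dict String (Int × Int)) (i : Int) : altLoop m i [] = m := by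
  unfold altLoop; rfl

lemma altLoop_cons (m : PySem.Dict String (Int × Int)) (i : Int) (b : String) (t : List String) :
    altLoop m i (b :: t) =
      altLoop (if b ≠ "." then m.insert b (i, 1 + (runLen b t : Int)) else m)
        (i + 1 + (runLen b t : Int)) (t.drop (runLen b t)) := by
  conv_lhs => rw [altLoop]

lemma drop_one_add (r : Nat) (b : String) (t : List String) :
    (b :: t).drop (1 + r) = t.drop r := by
  rw [Nat.add_comm]; rfl

-- skipping a maximal '.'-run only advances the index
lemma altLoop_dot (t : List String) (m : PySem.Dict String (Int × Int)) (j : Int) :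
    altLoop m j t = altLoop m (j + (runLen "." t : Int)) (t.drop (runLen "." t)) := by
  cases t with
  | nil => simp [runLen, altLoop_nil]
  | cons b u =>
    by_cases hb : b = "."
    · subst hb
      have h1 : runLen "." ("." :: u) = 1 + runLen "." u := by simp [runLen]
      rw [h1, drop_one_add, altLoop_cons]
      simp only [ne_eq, not_true_eq_false, if_false]
      congr 1
      push_cast; ring
    · have h0 : runLen "." (b :: u) = 0 := by simp [runLen, hb]
      rw [h0]; simp

-- main invariant: A's loop + flush, started with current_id = None (resp. Some k),
-- equals B's run loop
lemma main_inv (l : List String) :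
    (∀ (m : PySem.Dict String (Int × Int)) (s i : Int),
        getfpFinish ((PySem.List.enumerate l i).foldl getfpStep (m, none, s))
            (i + (l.length : Int))
          = altLoop m i l) ∧
    (∀ (m : PySem.Dict String (Int × Int)) (s i : Int) (k : String), k ≠ "." →
        getfpFinish ((PySem.List.enumerate l i).foldl getfpStep (m, some k, s))
            (i + (l.length : Int))
          = altLoop (m.insert k (s, (i + (runLen k l : Int)) - s)) (i + (runLen k l : Int))
              (l.drop (runLen k l))) := by
  induction l with
  | nil =>
    constructor
    · intro m s i
      simp [PySem.List.enumerate_nil, getfpFinish, altLoop_nil]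
    · intro m s i k _
      simp [PySem.List.enumerate_nil, getfpFinish, altLoop_nil, runLen]
  | cons b t ih =>
    constructor
    · intro m s i
      rw [PySem.List.enumerate_cons, List.foldl_cons]
      by_cases hb : b = "."
      · subst hb
        have hstep : getfpStep (m, none, s) (i, ".") = (m, none, s) := by
          simp [getfpStep]
        rw [hstep]
        have hlen : i + ((("." : String) :: t).length : Int) = (i + 1) + (t.length : Int) := by
          rw [List.length_cons]; push_cast; ring
        rw [hlen, ih.1 m s (i + 1)]
        rw [altLoop_cons]
        simp only [ne_eq, not_true_eq_false, if_false]
        exact altLoop_dot t m (i + 1)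
      · have hstep : getfpStep (m, none, s) (i, b) = (m, some b, i) := by
          simp [getfpStep, hb]
        rw [hstep]
        have hlen : i + ((b :: t).length : Int) = (i + 1) + (t.length : Int) := by
          rw [List.length_cons]; push_cast; ring
        rw [hlen, ih.2 m i (i + 1) b hb]
        rw [altLoop_cons]
        simp only [ne_eq, hb, not_false_iff, if_true]
        have e1 : ((i + 1) + (runLen b t : Int)) - i = 1 + (runLen b t : Int) := by ring
        have e2 : (i + 1) + (runLen b t : Int) = i + 1 + (runLen b t : Int) := by ring
        rw [e1, e2]
    · intro m s i k hk
      rw [PySem.List.enumerate_cons, List.foldl_cons]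
      by_cases hbk : b = k
      · subst hbk
        have hstep : getfpStep (m, some b, s) (i, b) = (m, some b, s) := by
          simp [getfpStep, hk]
        rw [hstep]
        have hlen : i + ((b :: t).length : Int) = (i + 1) + (t.length : Int) := by
          rw [List.length_cons]; push_cast; ring
        rw [hlen, ih.2 m s (i + 1) b hk]
        have hr : runLen b (b :: t) = 1 + runLen b t := by simp [runLen]
        rw [hr, drop_one_add]
        have e1 : (i + 1) + (runLen b t : Int) = i + ((1 + runLen b t : Nat) : Int) := by
          push_cast; ring
        rw [e1]
      · by_cases hb : b = "."
        · subst hb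
          have hstep : getfpStep (m, some k, s) (i, ".") =
              (m.insert k (s, i - s), none, s) := by
            simp [getfpStep]
          rw [hstep]
          have hlen : i + ((("." : String) :: t).length : Int) = (i + 1) + (t.length : Int) := by
            rw [List.length_cons]; push_cast; ring
          rw [hlen, ih.1 (m.insert k (s, i - s)) s (i + 1)]
          have hr : runLen k ("." :: t) = 0 := by
            simp [runLen]; intro h; exact hk h.symm
          rw [hr]
          simp only [Nat.cast_zero, add_zero, List.drop_zero]
          rw [altLoop_cons]
          simp only [ne_eq, not_true_eq_false, if_false]
          exact altLoop_dot t (m.insert k (s, i - s)) (i + 1)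
        · have hstep : getfpStep (m, some k, s) (i, b) =
              (m.insert k (s, i - s), some b, i) := by
            simp [getfpStep, hb, hbk]
          rw [hstep]
          have hlen : i + ((b :: t).length : Int) = (i + 1) + (t.length : Int) := by
            rw [List.length_cons]; push_cast; ring
          rw [hlen, ih.2 (m.insert k (s, i - s)) i (i + 1) b hb]
          have hr : runLen k (b :: t) = 0 := by simp [runLen, hbk]
          rw [hr]
          simp only [Nat.cast_zero, add_zero, List.drop_zero]
          rw [altLoop_cons]
          simp only [ne_eq, hb, not_false_iff, if_true]
          have e1 : ((i + 1) + (runLen b t : Int)) - i = 1 + (runLen b t : Int) := by ring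
          have e2 : (i + 1) + (runLen b t : Int) = i + 1 + (runLen b t : Int) := by ring
          rw [e1, e2]

-- ===== VERDICT (by name: the statement is the Claim_ definition above) =====
theorem get_file_positions_spec : Claim_equal_get_file_positions := by
  intro disk _
  unfold Spec_get_file_positions get_file_positions get_file_positions_alt
  have h := (main_inv disk).1 PySem.Dict.empty 0 0
  rw [show (0 : Int) + (disk.length : Int) = (disk.length : Int) by ring] at h
  rw [h]
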